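-- pv_equiv track=rewrite | github.com/xile42/codeforces-python | templates/diff_array.py | batch_query
-- ===== SOURCE A (Python) =====
-- from typing import List, Tuple
--
-- import bisect
-- from collections import defaultdict
--
-- def batch_query(lrws: List[Tuple[int, int, int]], queries: List[int]) -> List[int]:
--     """ 更新所有操作后, 批量查询对应点的值 """
--
--     diff = defaultdict(int)
--     for l, r, w in lrws:
--         diff[l] += w
--         diff[r + 1] -= w
--
--     xs = sorted(diff.keys())
--     prefix = list()
--     cur = 0
--     for x in xs:
--         cur += diff[x]
--         prefix.append((x, cur))
--
--     ans = list()
--     for q in queries: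
--         idx = bisect.bisect_right(xs, q) - 1
--         ans.append(prefix[idx][1] if idx >= 0 else 0)
--
--     return ans
-- ===== SOURCE B (Python) =====
-- from typing import List, Tuple
--
-- def batch_query(lrws: List[Tuple[int, int, int]], queries: List[int]) -> List[int]:
--     """Event decomposition: value at q = (sum of w opened at l <= q) - (sum of w closed at r < q)."""
--     return [sum(w for l, _, w in lrws if l <= q) - sum(w for _, r, w in lrws if r < q)
--             for q in queries]
-- ===== Notes on version B (the rewrite author's own statement) =====
-- stated objective: simpler
-- what changed: Replaced the defaultdict difference array, key sort, prefix-sum build and bisect lookup by a direct per-query event sum: answer(q) = sum of w over events with l <= q minus sum of w over events with r < q.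
import Mathlib
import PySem

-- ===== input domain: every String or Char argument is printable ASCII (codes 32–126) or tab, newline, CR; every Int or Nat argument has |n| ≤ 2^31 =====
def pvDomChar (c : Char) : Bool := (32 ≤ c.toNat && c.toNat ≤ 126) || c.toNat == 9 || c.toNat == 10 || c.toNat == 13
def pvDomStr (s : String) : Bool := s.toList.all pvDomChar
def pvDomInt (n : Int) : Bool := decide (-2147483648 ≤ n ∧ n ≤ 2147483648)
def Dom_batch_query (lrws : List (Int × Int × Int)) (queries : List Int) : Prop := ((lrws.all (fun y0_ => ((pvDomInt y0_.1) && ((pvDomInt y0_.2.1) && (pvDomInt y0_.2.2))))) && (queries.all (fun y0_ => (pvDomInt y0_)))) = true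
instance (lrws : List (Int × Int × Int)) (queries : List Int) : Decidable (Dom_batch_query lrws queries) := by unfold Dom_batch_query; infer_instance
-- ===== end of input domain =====

-- B replaces the difference-array/sort/prefix/bisect pipeline by a direct per-query
-- event sum (sum of w with l <= q minus sum of w with r < q); simpler, not faster.


-- ===== PORT A =====
-- diff = defaultdict(int); for l, r, w in lrws: diff[l] += w; diff[r+1] -= w
def bqDiff (lrws : List (Int × Int × Int)) : PySem.Dict Int Int :=
  lrws.foldl (fun d t =>
    (d.modify t.1 0 (fun v => v + t.2.2)).modify (t.2.1 + 1) 0 (fun v => v - t.2.2))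
    PySem.Dict.empty

def batch_query (lrws : List (Int × Int × Int)) (queries : List Int) : List Int :=
  let diff := bqDiff lrws
  let xs := PySem.List.sorted diff.keys (fun x => x) false
  -- prefix-building loop: cur += diff[x]; prefix.append((x, cur))
  let st := xs.foldl (fun (st : List (Int × Int) × Int) x =>
      let cur := st.2 + diff.getD x 0
      (st.1 ++ [(x, cur)], cur)) ([], 0)
  let pre := st.1
  -- prefix[idx] ported with pyGetD: exact here since 0 ≤ idx < len(prefix) whenever taken
  queries.foldl (fun ans q =>
      let idx : Int := (PySem.List.bisectRight xs q : Int) - 1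
      ans ++ [if 0 ≤ idx then (PySem.List.pyGetD pre idx (0, 0)).2 else 0]) []

-- ===== PORT B =====
def batch_query_alt (lrws : List (Int × Int × Int)) (queries : List Int) : List Int :=
  queries.map (fun q =>
    ((lrws.filter (fun t => t.1 ≤ q)).map (fun t => t.2.2)).sum
      - ((lrws.filter (fun t => t.2.1 < q)).map (fun t => t.2.2)).sum)

-- ===== PRECONDITION & SPEC =====
def Spec_batch_query (lrws : List (Int × Int × Int)) (queries : List Int) (out : List Int) : Prop := out = batch_query_alt lrws queries
instance (lrws : List (Int × Int × Int)) (queries : List Int) (out : List Int) : Decidable (Spec_batch_query lrws queries out) := by unfold Spec_batch_query; infer_instance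

-- ===== CLAIM (what is proved, stated in full; the proofs are below) =====
def Claim_equal_batch_query : Prop := ∀ (lrws : List (Int × Int × Int)) (queries : List Int), Dom_batch_query lrws queries → Spec_batch_query lrws queries (batch_query lrws queries)

-- ===== LEMMAS AND PROOFS =====

-- per-triple contribution to diff[x]
def bqG (x : Int) (t : Int × Int × Int) : Int :=
  (if t.1 = x then t.2.2 else 0) - (if t.2.1 + 1 = x then t.2.2 else 0)

-- the one loop step of A's first pass
def bqStep (d : PySem.Dict Int Int) (t : Int × Int × Int) : PySem.Dict Int Int :=
  (d.modify t.1 0 (fun v => v + t.2.2)).modify (t.2.1 + 1) 0 (fun v => v - t.2.2)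

theorem bqStep_getD (d : PySem.Dict Int Int) (t : Int × Int × Int) (x : Int) :
    (bqStep d t).getD x 0 = d.getD x 0 + bqG x t := by
  unfold bqStep bqG
  simp only [PySem.Dict.getD_modify]
  by_cases h1 : x = t.2.1 + 1 <;> by_cases h2 : x = t.1 <;>
    by_cases h3 : t.2.1 + 1 = t.1 <;> simp_all <;>
    (repeat rw [if_neg (by omega)]) <;> ring

theorem bqFoldDiff_getD (l : List (Int × Int × Int)) (d : PySem.Dict Int Int) (x : Int) :
    (l.foldl bqStep d).getD x 0 = d.getD x 0 + (l.map (bqG x)).sum := by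
  induction l generalizing d with
  | nil => simp
  | cons t r ih => simp [ih, bqStep_getD, add_assoc]

theorem mem_keys_bqStep (d : PySem.Dict Int Int) (t : Int × Int × Int) (x : Int) :
    x ∈ (bqStep d t).keys ↔ t.1 = x ∨ t.2.1 + 1 = x ∨ x ∈ d.keys := by
  unfold bqStep
  rw [PySem.Dict.keys_modify, PySem.Dict.mem_keys_insert,
      PySem.Dict.keys_modify, PySem.Dict.mem_keys_insert]
  constructor
  · rintro (h | h | h)
    · exact Or.inr (Or.inl h.symm)
    · exact Or.inl h.symm
    · exact Or.inr (Or.inr h)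
  · rintro (h | h | h)
    · exact Or.inr (Or.inl h.symm)
    · exact Or.inl h.symm
    · exact Or.inr (Or.inr h)

theorem mem_keys_bqFoldDiff (l : List (Int × Int × Int)) (d : PySem.Dict Int Int) (x : Int) :
    x ∈ (l.foldl bqStep d).keys ↔ x ∈ d.keys ∨ ∃ t ∈ l, t.1 = x ∨ t.2.1 + 1 = x := by
  induction l generalizing d with
  | nil => simp
  | cons t r ih =>
    rw [List.foldl_cons, ih, mem_keys_bqStep]
    simp only [List.exists_mem_cons_iff]
    constructor
    · rintro (h | h)
      · rcases h with h | h | h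
        · exact Or.inr (Or.inl (Or.inl h))
        · exact Or.inr (Or.inl (Or.inr h))
        · exact Or.inl h
      · exact Or.inr (Or.inr h)
    · rintro (h | h | h)
      · exact Or.inl (Or.inr (Or.inr h))
      · rcases h with h | h
        · exact Or.inl (Or.inl h)
        · exact Or.inl (Or.inr (Or.inl h))
      · exact Or.inr h

theorem nodup_keys_bqStep (d : PySem.Dict Int Int) (t : Int × Int × Int)
    (h : d.keys.Nodup) : (bqStep d t).keys.Nodup := by
  unfold bqStep
  simp only [PySem.Dict.keys_modify]
  exact PySem.Dict.nodup_keys_insert _ _ _ (PySem.Dict.nodup_keys_insert _ _ _ h)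

theorem nodup_keys_bqFoldDiff (l : List (Int × Int × Int)) (d : PySem.Dict Int Int)
    (h : d.keys.Nodup) : (l.foldl bqStep d).keys.Nodup := by
  induction l generalizing d with
  | nil => exact h
  | cons t r ih => exact ih _ (nodup_keys_bqStep d t h)

theorem bqDiff_eq_foldl (lrws : List (Int × Int × Int)) :
    bqDiff lrws = lrws.foldl bqStep PySem.Dict.empty := rfl

-- L1: value of the difference dictionary at any point
theorem bqDiff_getD (lrws : List (Int × Int × Int)) (x : Int) :
    (bqDiff lrws).getD x 0 = (lrws.map (bqG x)).sum := by
  rw [bqDiff_eq_foldl, bqFoldDiff_getD]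
  simp [PySem.Dict.getD_empty]

-- L2: keys of the difference dictionary
theorem mem_bqDiff_keys (lrws : List (Int × Int × Int)) (x : Int) :
    x ∈ (bqDiff lrws).keys ↔ ∃ t ∈ lrws, t.1 = x ∨ t.2.1 + 1 = x := by
  rw [bqDiff_eq_foldl, mem_keys_bqFoldDiff]
  simp [PySem.Dict.keys_empty]

-- L3: keys are distinct
theorem nodup_bqDiff_keys (lrws : List (Int × Int × Int)) :
    (bqDiff lrws).keys.Nodup := by
  rw [bqDiff_eq_foldl]
  exact nodup_keys_bqFoldDiff _ _ (by simp [PySem.Dict.keys_empty])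

-- the prefix list A builds, as a structural recursion
def bqScan (f : Int → Int) : List Int → Int → List (Int × Int)
  | [], _ => []
  | x :: t, c => (x, c + f x) :: bqScan f t (c + f x)

theorem bqFold_eq_scan (f : Int → Int) (l : List Int) (acc : List (Int × Int)) (c : Int) :
    l.foldl (fun (st : List (Int × Int) × Int) x =>
      (st.1 ++ [(x, st.2 + f x)], st.2 + f x)) (acc, c)
    = (acc ++ bqScan f l c, c + (l.map f).sum) := by
  induction l generalizing acc c with
  | nil => simp [bqScan]
  | cons x t ih => simp [bqScan, ih, List.append_assoc, add_assoc]

theorem bqScan_getD_snd (f : Int → Int) (l : List Int) (c : Int) (i : Nat) (h : i < l.length) :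
    ((bqScan f l c).getD i (0, 0)).2 = c + ((l.take (i + 1)).map f).sum := by
  induction l generalizing c i with
  | nil => simp at h
  | cons x t ih =>
    cases i with
    | zero => simp [bqScan]
    | succ j =>
      simp only [List.length_cons, Nat.add_lt_add_iff_right] at h
      have := ih (c + f x) j h
      simp only [List.getD] at this ⊢
      simp [bqScan, this, add_assoc, List.map_take]

-- L6: on a sorted list, the first bisectRight elements are exactly those ≤ q
theorem take_bisectRight_eq_filter (xs : List Int) (q : Int)
    (hp : xs.Pairwise (fun a b => a ≤ b)) :
    xs.filter (fun x => decide (x ≤ q)) = xs.take (PySem.List.bisectRight xs q) := by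
  obtain ⟨hk, h2, h3⟩ := PySem.List.bisectRight_spec xs q hp
  set k := PySem.List.bisectRight xs q with hkdef
  have hsplit : xs = xs.take k ++ xs.drop k := (List.take_append_drop k xs).symm
  have htake : (xs.take k).filter (fun x => decide (x ≤ q)) = xs.take k := by
    rw [List.filter_eq_self]
    intro a ha
    rw [List.mem_iff_getElem] at ha
    obtain ⟨i, hi, rfl⟩ := ha
    rw [List.getElem_take]
    have hilen : i < xs.length := lt_of_lt_of_le (lt_of_lt_of_le hi (by simp)) (le_refl _)
    have hik : i < k := lt_of_lt_of_le hi (by simp [List.length_take])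
    simpa using h2 i hilen hik
  have hdrop : (xs.drop k).filter (fun x => decide (x ≤ q)) = [] := by
    rw [List.filter_eq_nil_iff]
    intro a ha
    rw [List.mem_iff_getElem] at ha
    obtain ⟨i, hi, rfl⟩ := ha
    rw [List.getElem_drop]
    have hilen : k + i < xs.length := by
      have := hi; simp [List.length_drop] at this; omega
    have := h3 (k + i) hilen (Nat.le_add_right k i)
    simp
    omega
  calc xs.filter (fun x => decide (x ≤ q))
      = (xs.take k ++ xs.drop k).filter (fun x => decide (x ≤ q)) := by rw [← hsplit]
    _ = xs.take k := by rw [List.filter_append, htake, hdrop, List.append_nil]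

-- L7: sum over a filter as a sum of guarded terms
theorem sum_map_filter' {α : Type} (p : α → Bool) (f : α → Int) (l : List α) :
    ((l.filter p).map f).sum = (l.map (fun x => if p x then f x else 0)).sum := by
  induction l with
  | nil => simp
  | cons x t ih => by_cases h : p x = true <;> simp [h, ih]

-- L8: indicator sum over a duplicate-free list
theorem sum_indicator (ys : List Int) (a w : Int) (hnd : ys.Nodup) :
    (ys.map (fun x => if a = x then w else 0)).sum = if a ∈ ys then w else 0 := by
  induction ys with
  | nil => simp
  | cons y t ih =>
    simp only [List.nodup_cons] at hnd
    by_cases h : a = y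
    · subst h
      simp [ih hnd.2, hnd.1]
    · simp [List.map_cons, List.sum_cons, h, ih hnd.2, List.mem_cons]

-- pointwise subtraction distributes over list sums
theorem sum_map_sub {α : Type} (l : List α) (f g : α → Int) :
    (l.map (fun x => f x - g x)).sum = (l.map f).sum - (l.map g).sum := by
  induction l with
  | nil => simp
  | cons x t ih => simp [ih]; ring

-- pointwise addition distributes over list sums
theorem sum_map_add {α : Type} (l : List α) (f g : α → Int) :
    (l.map (fun x => f x + g x)).sum = (l.map f).sum + (l.map g).sum := by
  induction l with
  | nil => simp
  | cons x t ih => simp [ih]; ring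

-- L9: exchanging two list sums
theorem sum_exchange {α β : Type} (L : List α) (M : List β) (g : α → β → Int) :
    (L.map (fun x => (M.map (g x)).sum)).sum = (M.map (fun t => (L.map (fun x => g x t)).sum)).sum := by
  induction L with
  | nil => simp
  | cons x t ih =>
    simp only [List.map_cons, List.sum_cons, ih]
    rw [← sum_map_add]

-- the per-query value of port A equals the per-query value of port B
theorem per_query (lrws : List (Int × Int × Int)) (q : Int) :
    (let diff := bqDiff lrws
     let xs := PySem.List.sorted diff.keys (fun x => x) false
     let st := xs.foldl (fun (st : List (Int × Int) × Int) x =>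
        let cur := st.2 + diff.getD x 0
        (st.1 ++ [(x, cur)], cur)) ([], 0)
     let idx : Int := (PySem.List.bisectRight xs q : Int) - 1
     if 0 ≤ idx then (PySem.List.pyGetD st.1 idx (0, 0)).2 else 0)
    = ((lrws.filter (fun t => t.1 ≤ q)).map (fun t => t.2.2)).sum
      - ((lrws.filter (fun t => t.2.1 < q)).map (fun t => t.2.2)).sum := by
  obtain ⟨hkle, h2, h3⟩ := PySem.List.bisectRight_spec
    (PySem.List.sorted (bqDiff lrws).keys (fun x => x) false) q
    (PySem.List.sorted_pairwise (bqDiff lrws).keys (fun x => x))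
  simp only [bqFold_eq_scan, List.nil_append]
  set diff := bqDiff lrws with hdiff
  set xs := PySem.List.sorted diff.keys (fun x => x) false with hxs
  set f : Int → Int := fun x => diff.getD x 0 with hf
  set k := PySem.List.bisectRight xs q with hkdef
  -- Step 1: the looked-up prefix value is the sum over the first k keys
  have step1 : (if 0 ≤ (k : Int) - 1 then (PySem.List.pyGetD (bqScan f xs 0) ((k : Int) - 1) (0, 0)).2 else 0)
      = ((xs.take k).map f).sum := by
    by_cases hk0 : k = 0
    · simp [hk0]
    · have hk1 : 1 ≤ k := Nat.one_le_iff_ne_zero.mpr hk0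
      rw [if_pos (by omega)]
      have hcast : (k : Int) - 1 = ((k - 1 : Nat) : Int) := by omega
      rw [hcast, PySem.List.pyGetD_natCast]
      have hlt : k - 1 < xs.length := by omega
      rw [bqScan_getD_snd f xs 0 (k - 1) hlt]
      have : k - 1 + 1 = k := by omega
      rw [this, zero_add]
  rw [step1, ← take_bisectRight_eq_filter xs q (PySem.List.sorted_pairwise diff.keys (fun x => x))]
  -- Step 2/3: sum over the keys ≤ q, exchanged into a per-triple sum
  set L := xs.filter (fun x => decide (x ≤ q)) with hL
  have hndxs : xs.Nodup := ((PySem.List.sorted_perm diff.keys (fun x => x) false).nodup_iff).mpr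
    (nodup_bqDiff_keys lrws)
  have hndL : L.Nodup := hndxs.filter _
  have hLf : L.map f = L.map (fun x => (lrws.map (bqG x)).sum) :=
    List.map_congr_left (fun x _ => bqDiff_getD lrws x)
  rw [hLf, sum_exchange]
  -- per-triple value
  have hmemL : ∀ a : Int, a ∈ L ↔ a ∈ diff.keys ∧ a ≤ q := by
    intro a
    rw [hL, List.mem_filter, PySem.List.mem_sorted]
    simp
  have per_t : ∀ t ∈ lrws, (L.map (fun x => bqG x t)).sum
      = (if t.1 ≤ q then t.2.2 else 0) - (if t.2.1 + 1 ≤ q then t.2.2 else 0) := by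
    intro t ht
    have h1 : t.1 ∈ diff.keys := (mem_bqDiff_keys lrws t.1).mpr ⟨t, ht, Or.inl rfl⟩
    have hr : t.2.1 + 1 ∈ diff.keys := (mem_bqDiff_keys lrws (t.2.1 + 1)).mpr ⟨t, ht, Or.inr rfl⟩
    have : (L.map (fun x => bqG x t)).sum
        = (L.map (fun x => if t.1 = x then t.2.2 else 0)).sum
          - (L.map (fun x => if t.2.1 + 1 = x then t.2.2 else 0)).sum := by
      rw [← sum_map_sub]
      exact congrArg List.sum (List.map_congr_left (fun x _ => rfl))
    rw [this, sum_indicator L t.1 t.2.2 hndL, sum_indicator L (t.2.1 + 1) t.2.2 hndL]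
    simp only [hmemL]
    by_cases hc1 : t.1 ≤ q <;> by_cases hc2 : t.2.1 + 1 ≤ q <;>
      simp [hc1, hc2, h1, hr]
  rw [List.map_congr_left per_t, sum_map_sub]
  -- Step 4: back to port B's two filtered sums
  congr 1
  · rw [sum_map_filter' (fun t => decide (t.1 ≤ q)) (fun t => t.2.2) lrws]
    exact congrArg List.sum (List.map_congr_left (fun t _ => by by_cases h : t.1 ≤ q <;> simp [h]))
  · rw [sum_map_filter' (fun t => decide (t.2.1 < q)) (fun t => t.2.2) lrws]
    exact congrArg List.sum (List.map_congr_left (fun t _ => by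
      by_cases h : t.2.1 < q
      · rw [if_pos (by omega), if_pos (by simpa using h)]
      · rw [if_neg (by omega), if_neg (by simpa using h)]))

-- ===== VERDICT (by name: the statement is the Claim_ definition above) =====
theorem batch_query_spec : Claim_equal_batch_query := by
  intro lrws queries _
  unfold Spec_batch_query batch_query batch_query_alt
  simp only []
  rw [PySem.List.foldl_append_singleton_eq_map
    (f := fun q => if 0 ≤ (PySem.List.bisectRight (PySem.List.sorted (bqDiff lrws).keys (fun x => x) false) q : Int) - 1
      then (PySem.List.pyGetD ((PySem.List.sorted (bqDiff lrws).keys (fun x => x) false).foldl (fun (st : List (Int × Int) × Int) x =>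
        (st.1 ++ [(x, st.2 + (bqDiff lrws).getD x 0)], st.2 + (bqDiff lrws).getD x 0)) ([], 0)).1
        ((PySem.List.bisectRight (PySem.List.sorted (bqDiff lrws).keys (fun x => x) false) q : Int) - 1) (0, 0)).2 else 0)]
  simp only [List.nil_append]
  exact List.map_congr_left (fun q _ => per_query lrws q)
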